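-- pv_equiv track=rewrite | github.com/vaibhavs825/DS_ALGO_IN_PYTHON | test.py | dfs
-- ===== SOURCE A (Python) =====
-- def dfs(src,waterlevel,cost,apple,val,g):
--     if not g.get(src,None):
--         if waterlevel[src]==apple:
--             val[src]=cost
--             return cost
--         return 0
--
--     if g.get(src,None):
--         penalty = 0
--         if waterlevel[src]==apple:
--             penalty = cost
--         for t in g[src]:
--             penalty += dfs(t,waterlevel,cost,apple,val,g)
--     val[src] = penalty
--     return penalty
-- ===== SOURCE B (Python) =====
-- def dfs(src, waterlevel, cost, apple, val, g):
--     total = 0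
--     stack = [src]
--     while stack:
--         u = stack.pop()
--         if waterlevel[u] == apple:
--             total += cost
--         stack.extend(g.get(u) or [])
--     return total
-- ===== Notes on version B (the rewrite author's own statement) =====
-- stated objective: simpler
-- what changed: Replaces A's recursive postorder DFS with per-node penalty bookkeeping (and writes into val) by an iterative explicit-stack traversal that simply adds cost for every visited node whose waterlevel equals apple; return-value equivalence only, B does not mutate val.
import Mathlib
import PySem

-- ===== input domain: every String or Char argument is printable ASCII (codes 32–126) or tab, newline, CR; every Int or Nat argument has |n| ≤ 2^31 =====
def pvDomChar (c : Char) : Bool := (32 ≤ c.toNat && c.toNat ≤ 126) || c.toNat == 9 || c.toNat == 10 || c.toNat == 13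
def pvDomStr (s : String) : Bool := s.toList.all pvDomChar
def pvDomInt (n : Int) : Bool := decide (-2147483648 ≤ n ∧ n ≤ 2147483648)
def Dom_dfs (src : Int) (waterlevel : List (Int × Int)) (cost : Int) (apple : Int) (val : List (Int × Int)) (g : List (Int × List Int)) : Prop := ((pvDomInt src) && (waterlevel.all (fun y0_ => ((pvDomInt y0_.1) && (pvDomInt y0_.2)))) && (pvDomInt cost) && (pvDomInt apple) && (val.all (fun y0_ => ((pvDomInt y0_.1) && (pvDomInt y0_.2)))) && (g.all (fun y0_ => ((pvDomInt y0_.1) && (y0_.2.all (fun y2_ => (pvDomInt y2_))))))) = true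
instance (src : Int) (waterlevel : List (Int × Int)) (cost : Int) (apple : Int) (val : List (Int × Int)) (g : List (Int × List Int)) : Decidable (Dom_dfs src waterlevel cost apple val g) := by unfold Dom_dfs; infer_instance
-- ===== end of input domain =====

-- B replaces A's recursive per-node penalty bookkeeping by an iterative stack traversal that
-- adds cost for every visited node whose waterlevel matches apple; equivalence is about the
-- RETURN value only (A also writes into the dict `val`, B does not).

-- ===== PORT A =====
-- fueled transliteration of A's recursion; `none` = Python raises (KeyError / unbounded recursion).
-- Inside Pre_dfs the fuel `g.length + 1` is proved sufficient (recursion depth ≤ #keys + 1).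
def dfsA (wl : List (Int × Int)) (c ap : Int) (g : List (Int × List Int)) : Nat → Int → Option Int
  | 0, _ => none
  | fuel + 1, src =>
    let gu := (PySem.Dict.mk g).get? src
    if gu = none ∨ gu = some [] then        -- `if not g.get(src, None):`
      match (PySem.Dict.mk wl).get? src with -- `waterlevel[src]` (KeyError = none)
      | none => none
      | some w => if w = ap then some c else some 0
    else                                     -- `if g.get(src, None):`
      match (PySem.Dict.mk wl).get? src with
      | none => none
      | some w =>
        let penalty : Int := if w = ap then c else 0
        (gu.getD []).foldlM                  -- `for t in g[src]: penalty += dfs(t, …)`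
          (fun acc t => (dfsA wl c ap g fuel t).map (fun r => acc + r)) penalty

def dfs (src : Int) (waterlevel : List (Int × Int)) (cost : Int) (apple : Int) (val : List (Int × Int)) (g : List (Int × List Int)) : Int :=
  (dfsA waterlevel cost apple g (g.length + 1) src).getD 0

-- ===== PORT B =====
def pvMaxAdj (g : List (Int × List Int)) : Nat :=
  g.foldl (fun m p => max m p.2.length) 0

-- fueled transliteration of B's while-loop; the Python stack's top is the list's LAST element
-- (`stack.pop()` / `stack.extend`); `none` = KeyError or fuel exhausted (impossible inside Pre_dfs).
def loopB (wl : List (Int × Int)) (c ap : Int) (g : List (Int × List Int)) : Nat → List Int → Int → Option Int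
  | 0, _, _ => none
  | _ + 1, [], total => some total           -- `while stack:` fails, `return total`
  | fuel + 1, x :: xs, total =>
    let u := (x :: xs).getLastD 0            -- `u = stack.pop()`
    let rest := (x :: xs).dropLast
    match (PySem.Dict.mk wl).get? u with     -- `waterlevel[u]`
    | none => none
    | some w =>
      loopB wl c ap g fuel (rest ++ ((PySem.Dict.mk g).get? u).getD [])  -- `stack.extend(g.get(u) or [])`
        (if w = ap then total + c else total)

def dfs_alt (src : Int) (waterlevel : List (Int × Int)) (cost : Int) (apple : Int) (val : List (Int × Int)) (g : List (Int × List Int)) : Int :=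
  (loopB waterlevel cost apple g ((pvMaxAdj g + 1) ^ (g.length + 1) + 1) [src] 0).getD 0

-- ===== PRECONDITION & SPEC =====
-- children of a node (g.get(u) or [])
def pvAdj (g : List (Int × List Int)) (u : Int) : List Int := (((PySem.Dict.mk g).get? u).getD [])

-- one breadth step of reachability: add every successor of the current set
def pvReachStep (g : List (Int × List Int)) (s : List Int) : List Int :=
  (s.flatMap (pvAdj g)).foldl (fun acc v => if v ∈ acc then acc else acc ++ [v]) s

-- all nodes reachable from src (g.length + 1 expansion rounds always saturate)
def pvReach (src : Int) (g : List (Int × List Int)) : List Int :=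
  (pvReachStep g)^[g.length + 1] [src]

-- topological elimination: repeatedly drop nodes all of whose successors are already dropped;
-- the reachable subgraph is acyclic iff this empties
def pvElim (g : List (Int × List Int)) (R : List Int) : Nat → List Int
  | 0 => R
  | i + 1 => (pvElim g R i).filter (fun u => (pvAdj g u).any (fun v => decide (v ∈ pvElim g R i)))

-- Pre_dfs = exactly the inputs on which the Python A returns: every node reachable from src has a
-- waterlevel entry (else KeyError) and the reachable subgraph is acyclic (else unbounded recursion).
def Pre_dfs (src : Int) (waterlevel : List (Int × Int)) (cost : Int) (apple : Int) (val : List (Int × Int)) (g : List (Int × List Int)) : Prop :=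
  (∀ u ∈ pvReach src g, ((PySem.Dict.mk waterlevel).get? u).isSome = true) ∧
  (∀ u ∈ pvReach src g, ∀ v ∈ pvAdj g u, v ∈ pvReach src g) ∧
  pvElim g (pvReach src g) (g.length + 1) = []
instance (src : Int) (waterlevel : List (Int × Int)) (cost : Int) (apple : Int) (val : List (Int × Int)) (g : List (Int × List Int)) : Decidable (Pre_dfs src waterlevel cost apple val g) := by unfold Pre_dfs; infer_instance

def pvWitness_dfs : Int × (List (Int × Int)) × Int × Int × (List (Int × Int)) × (List (Int × List Int)) :=
  (0, [(0, 1), (1, 1), (2, 2)], 5, 1, [], [(0, [1, 2])])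

def Spec_dfs (src : Int) (waterlevel : List (Int × Int)) (cost : Int) (apple : Int) (val : List (Int × Int)) (g : List (Int × List Int)) (out : Int) : Prop := out = dfs_alt src waterlevel cost apple val g
instance (src : Int) (waterlevel : List (Int × Int)) (cost : Int) (apple : Int) (val : List (Int × Int)) (g : List (Int × List Int)) (out : Int) : Decidable (Spec_dfs src waterlevel cost apple val g out) := by unfold Spec_dfs; infer_instance

-- ===== CLAIM (what is proved, stated in full; the proofs are below) =====
def Claim_equal_dfs : Prop := ∀ (src : Int) (waterlevel : List (Int × Int)) (cost : Int) (apple : Int) (val : List (Int × Int)) (g : List (Int × List Int)), Dom_dfs src waterlevel cost apple val g → Pre_dfs src waterlevel cost apple val g → Spec_dfs src waterlevel cost apple val g (dfs src waterlevel cost apple val g)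

-- ===== LEMMAS AND PROOFS =====

-- rank of a node = first elimination round at which it is gone (0 if it never disappears);
-- inside Pre_dfs every node is gone by round g.length + 1
def pvRank (g : List (Int × List Int)) (R : List Int) (u : Int) : Nat :=
  if h : u ∉ pvElim g R (g.length + 1) then Nat.find (⟨g.length + 1, h⟩ : ∃ n, u ∉ pvElim g R n) else 0

-- A's return value (inside Pre_dfs): the fueled port at sufficient fuel
def pvVal (wl : List (Int × Int)) (c ap : Int) (g : List (Int × List Int)) (u : Int) : Int :=
  (dfsA wl c ap g (g.length + 1) u).getD 0

-- termination weight for B's stack loop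
def pvWgt (g : List (Int × List Int)) (R : List Int) (u : Int) : Nat :=
  (pvMaxAdj g + 1) ^ (pvRank g R u)

theorem pvRank_spec (g : List (Int × List Int)) (R : List Int) (u : Int)
    (hC2 : pvElim g R (g.length + 1) = []) :
    u ∉ pvElim g R (pvRank g R u) ∧ ∀ m < pvRank g R u, u ∈ pvElim g R m := by
  have h : u ∉ pvElim g R (g.length + 1) := by rw [hC2]; simp
  unfold pvRank
  rw [dif_pos h]
  have hex : ∃ n, u ∉ pvElim g R n := ⟨g.length + 1, h⟩
  exact ⟨Nat.find_spec hex, fun m hm => not_not.mp (Nat.find_min hex hm)⟩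

theorem pvRank_le (g : List (Int × List Int)) (R : List Int) (u : Int)
    (hC2 : pvElim g R (g.length + 1) = []) : pvRank g R u ≤ g.length + 1 := by
  have h : u ∉ pvElim g R (g.length + 1) := by rw [hC2]; simp
  unfold pvRank
  rw [dif_pos h]
  exact Nat.find_le h

theorem pvRank_pos (g : List (Int × List Int)) (R : List Int) (u : Int)
    (hC2 : pvElim g R (g.length + 1) = []) (hu : u ∈ R) : 1 ≤ pvRank g R u := by
  by_contra hlt
  have h0 : pvRank g R u = 0 := by omega
  have := (pvRank_spec g R u hC2).1
  rw [h0] at this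
  exact this hu

theorem pvRank_child (g : List (Int × List Int)) (R : List Int) (u v : Int)
    (hC2 : pvElim g R (g.length + 1) = []) (hu : u ∈ R) (hv : v ∈ pvAdj g u) :
    pvRank g R v < pvRank g R u := by
  obtain ⟨hout, hin⟩ := pvRank_spec g R u hC2
  have hpos := pvRank_pos g R u hC2 hu
  obtain ⟨r, hr⟩ : ∃ r, pvRank g R u = r + 1 := ⟨pvRank g R u - 1, by omega⟩
  have humem : u ∈ pvElim g R r := hin r (by omega)
  rw [hr] at hout
  have hvnot : v ∉ pvElim g R r := by
    intro hvmem
    apply hout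
    simp only [pvElim, List.mem_filter]
    refine ⟨humem, ?_⟩
    simp only [List.any_eq_true, decide_eq_true_eq]
    exact ⟨v, hv, hvmem⟩
  have hle : pvRank g R v ≤ r := by
    have h : v ∉ pvElim g R (g.length + 1) := by rw [hC2]; simp
    unfold pvRank
    rw [dif_pos h]
    exact Nat.find_le hvnot
  omega

-- a for-loop `penalty += h t` over Option: foldlM sums the values when every step succeeds
theorem pvFoldlM_sum (h : Int → Option Int) (v : Int → Int) (l : List Int)
    (hl : ∀ t ∈ l, h t = some (v t)) (acc : Int) :
    l.foldlM (fun a t => (h t).map (fun r => a + r)) acc = some (acc + (l.map v).sum) := by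
  induction l generalizing acc with
  | nil => simp [List.foldlM]
  | cons x xs ih =>
    have hx : h x = some (v x) := hl x (by simp)
    simp only [List.foldlM_cons, hx, Option.map_some, Option.bind_eq_bind, Option.bind_some]
    rw [ih (fun t ht => hl t (by simp [ht]))]
    simp [add_assoc]

theorem pvMaxAdj_aux (l : List (Int × List Int)) : ∀ init : Nat,
    init ≤ l.foldl (fun m p => max m p.2.length) init ∧
    ∀ p ∈ l, p.2.length ≤ l.foldl (fun m p => max m p.2.length) init := by
  induction l with
  | nil => intro init; simp
  | cons q qs ih =>
    intro init
    constructor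
    · calc init ≤ max init q.2.length := le_max_left _ _
        _ ≤ _ := (ih (max init q.2.length)).1
    · intro p hp
      rcases List.mem_cons.mp hp with rfl | hp'
      · calc p.2.length ≤ max init p.2.length := le_max_right _ _
          _ ≤ _ := (ih (max init p.2.length)).1
      · exact (ih (max init q.2.length)).2 p hp'

theorem pvAdj_len_le (g : List (Int × List Int)) (u : Int) :
    (pvAdj g u).length ≤ pvMaxAdj g := by
  unfold pvAdj
  cases hgu : (PySem.Dict.mk g).get? u with
  | none => simp
  | some l =>
    simp only [Option.getD_some]
    have hmem : (u, l) ∈ (PySem.Dict.mk g).items := PySem.Dict.mem_items_of_get?_eq_some _ hgu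
    have : (u, l) ∈ g := hmem
    exact (pvMaxAdj_aux g 0).2 (u, l) this

theorem pvWgt_ge (g : List (Int × List Int)) (R : List Int) (u : Int)
    (hC2 : pvElim g R (g.length + 1) = []) (hu : u ∈ R) :
    ((pvAdj g u).map (pvWgt g R)).sum + 1 ≤ pvWgt g R u := by
  have hpos := pvRank_pos g R u hC2 hu
  obtain ⟨r, hr⟩ : ∃ r, pvRank g R u = r + 1 := ⟨pvRank g R u - 1, by omega⟩
  set M := pvMaxAdj g with hM
  have hbound : ∀ x ∈ (pvAdj g u).map (pvWgt g R), x ≤ (M + 1) ^ r := by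
    intro x hx
    obtain ⟨t, ht, rfl⟩ := List.mem_map.mp hx
    have := pvRank_child g R u t hC2 hu ht
    rw [hr] at this
    exact Nat.pow_le_pow_right (by omega) (by omega)
  have hsum : ((pvAdj g u).map (pvWgt g R)).sum ≤ ((pvAdj g u).map (pvWgt g R)).length * ((M + 1) ^ r) := by
    simpa [smul_eq_mul] using List.sum_le_card_nsmul _ _ hbound
  have hlen : ((pvAdj g u).map (pvWgt g R)).length ≤ M := by
    simpa using pvAdj_len_le g u
  have h1 : 1 ≤ (M + 1) ^ r := Nat.one_le_pow _ _ (by omega)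
  have hmul : ((pvAdj g u).map (pvWgt g R)).length * ((M + 1) ^ r) ≤ M * ((M + 1) ^ r) :=
    Nat.mul_le_mul_right _ hlen
  have hpow : pvWgt g R u = (M + 1) ^ r * (M + 1) := by
    rw [pvWgt, hr, pow_succ]
  have : (M + 1) ^ r * (M + 1) = M * ((M + 1) ^ r) + (M + 1) ^ r := by ring
  omega

-- the reach set contains its seed after every expansion round
theorem pvReachStep_mono (g : List (Int × List Int)) (s : List Int) (x : Int) (hx : x ∈ s) :
    x ∈ pvReachStep g s := by
  unfold pvReachStep
  generalize s.flatMap (pvAdj g) = l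
  induction l generalizing s with
  | nil => simpa using hx
  | cons y ys ih =>
    simp only [List.foldl_cons]
    by_cases hy : y ∈ s
    · simp only [if_pos hy]; exact ih s hx
    · simp only [if_neg hy]; exact ih _ (by simp [hx])

theorem pvSrc_mem_reach (src : Int) (g : List (Int × List Int)) : src ∈ pvReach src g := by
  unfold pvReach
  generalize g.length + 1 = n
  induction n with
  | zero => simp
  | succ k ih =>
    rw [Function.iterate_succ_apply']
    exact pvReachStep_mono g _ src ih

-- MAIN LEMMA (A side): with enough fuel the fueled port returns pvVal, for each reachable node
theorem pvDfsA_eval (wl : List (Int × Int)) (c ap : Int) (g : List (Int × List Int)) (R : List Int)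
    (hwl : ∀ u ∈ R, ((PySem.Dict.mk wl).get? u).isSome = true)
    (hcl : ∀ u ∈ R, ∀ v ∈ pvAdj g u, v ∈ R)
    (hC2 : pvElim g R (g.length + 1) = []) :
    ∀ n, ∀ u ∈ R, pvRank g R u ≤ n → ∀ f, pvRank g R u ≤ f →
      dfsA wl c ap g f u = some (pvVal wl c ap g u) := by
  intro n
  induction n with
  | zero =>
    intro u hu hrn
    have := pvRank_pos g R u hC2 hu
    omega
  | succ n ih =>
    intro u hu hrn f hrf
    have hpos := pvRank_pos g R u hC2 hu
    obtain ⟨w, hw⟩ : ∃ w, (PySem.Dict.mk wl).get? u = some w := by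
      have := hwl u hu
      cases h : (PySem.Dict.mk wl).get? u with
      | none => rw [h] at this; simp at this
      | some w => exact ⟨w, rfl⟩
    -- one value returned at every sufficient fuel
    have key : ∃ vOut : Int, ∀ f', pvRank g R u ≤ f' + 1 → dfsA wl c ap g (f' + 1) u = some vOut := by
      cases hgu : (PySem.Dict.mk g).get? u with
      | none =>
        exact ⟨if w = ap then c else 0, fun f' _ => by
          simp [dfsA, hgu, hw]; split_ifs <;> rfl⟩
      | some l =>
        cases l with
        | nil =>
          exact ⟨if w = ap then c else 0, fun f' _ => by
            simp [dfsA, hgu, hw]; split_ifs <;> rfl⟩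
        | cons x xs =>
          refine ⟨(if w = ap then c else 0) + ((x :: xs).map (pvVal wl c ap g)).sum, fun f' hf' => ?_⟩
          have hadj : pvAdj g u = x :: xs := by simp [pvAdj, hgu]
          have hkids : ∀ t ∈ x :: xs, dfsA wl c ap g f' t = some (pvVal wl c ap g t) := by
            intro t ht
            have htadj : t ∈ pvAdj g u := by rw [hadj]; exact ht
            have htR : t ∈ R := hcl u hu t htadj
            have htr := pvRank_child g R u t hC2 hu htadj
            exact ih t htR (by omega) f' (by omega)
          simp only [dfsA, hgu]
          rw [if_neg (by simp), hw]
          simpa using pvFoldlM_sum (dfsA wl c ap g f') (pvVal wl c ap g) (x :: xs) hkids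
            (if w = ap then c else 0)
    obtain ⟨vOut, hv⟩ := key
    have hle := pvRank_le g R u hC2
    have hval : pvVal wl c ap g u = vOut := by
      unfold pvVal
      rw [hv g.length (by omega)]
      rfl
    cases f with
    | zero => omega
    | succ f' => rw [hv f' (by omega), hval]

-- pvVal satisfies the DFS recurrence at every reachable node
theorem pvVal_rec (wl : List (Int × Int)) (c ap : Int) (g : List (Int × List Int)) (R : List Int)
    (hwl : ∀ u ∈ R, ((PySem.Dict.mk wl).get? u).isSome = true)
    (hcl : ∀ u ∈ R, ∀ v ∈ pvAdj g u, v ∈ R)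
    (hC2 : pvElim g R (g.length + 1) = []) :
    ∀ u ∈ R, ∃ w, (PySem.Dict.mk wl).get? u = some w ∧
      pvVal wl c ap g u = (if w = ap then c else 0) + ((pvAdj g u).map (pvVal wl c ap g)).sum := by
  intro u hu
  obtain ⟨w, hw⟩ : ∃ w, (PySem.Dict.mk wl).get? u = some w := by
    have := hwl u hu
    cases h : (PySem.Dict.mk wl).get? u with
    | none => rw [h] at this; simp at this
    | some w => exact ⟨w, rfl⟩
  refine ⟨w, hw, ?_⟩
  cases hgu : (PySem.Dict.mk g).get? u with
  | none =>
    unfold pvVal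
    simp [dfsA, hgu, hw, pvAdj]
    split_ifs <;> rfl
  | some l =>
    cases l with
    | nil =>
      unfold pvVal
      simp [dfsA, hgu, hw, pvAdj]
      split_ifs <;> rfl
    | cons x xs =>
      have hadj : pvAdj g u = x :: xs := by simp [pvAdj, hgu]
      have hkids : ∀ t ∈ x :: xs, dfsA wl c ap g g.length t = some (pvVal wl c ap g t) := by
        intro t ht
        have htadj : t ∈ pvAdj g u := by rw [hadj]; exact ht
        have htR : t ∈ R := hcl u hu t htadj
        have htr := pvRank_child g R u t hC2 hu htadj
        have hle := pvRank_le g R u hC2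
        exact pvDfsA_eval wl c ap g R hwl hcl hC2 (pvRank g R t) t htR le_rfl g.length (by omega)
      have hval : dfsA wl c ap g (g.length + 1) u
          = some ((if w = ap then c else 0) + ((x :: xs).map (pvVal wl c ap g)).sum) := by
        simp only [dfsA, hgu]
        rw [if_neg (by simp), hw]
        simpa using pvFoldlM_sum (dfsA wl c ap g g.length) (pvVal wl c ap g) (x :: xs) hkids
          (if w = ap then c else 0)
      show (dfsA wl c ap g (g.length + 1) u).getD 0 = _
      rw [hval, hadj]
      simp

theorem pvSplit_last (x : Int) (xs : List Int) :
    (x :: xs).dropLast ++ [(x :: xs).getLastD 0] = x :: xs := by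
  induction xs generalizing x with
  | nil => simp
  | cons y ys ih => simpa using ih y

-- MAIN LEMMA (B side): the stack loop returns total + Σ pvVal over the stack
theorem pvLoopB_eval (wl : List (Int × Int)) (c ap : Int) (g : List (Int × List Int)) (R : List Int)
    (hwl : ∀ u ∈ R, ((PySem.Dict.mk wl).get? u).isSome = true)
    (hcl : ∀ u ∈ R, ∀ v ∈ pvAdj g u, v ∈ R)
    (hC2 : pvElim g R (g.length + 1) = []) :
    ∀ fuel (stack : List Int) (total : Int), (∀ u ∈ stack, u ∈ R) →
      (stack.map (pvWgt g R)).sum + 1 ≤ fuel →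
      loopB wl c ap g fuel stack total = some (total + (stack.map (pvVal wl c ap g)).sum) := by
  intro fuel
  induction fuel with
  | zero => intro stack total _ hm; omega
  | succ f ih =>
    intro stack total hstR hm
    cases hstack : stack with
    | nil => simp [loopB]
    | cons x xs =>
      subst hstack
      set u := (x :: xs).getLastD 0 with hu
      set rest := (x :: xs).dropLast with hrest
      have hsplit : rest ++ [u] = x :: xs := by
        rw [hu, hrest]; exact pvSplit_last x xs
      have huR : u ∈ R := hstR u (by rw [← hsplit]; simp)
      obtain ⟨w, hw⟩ : ∃ w, (PySem.Dict.mk wl).get? u = some w := by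
        have := hwl u huR
        cases h : (PySem.Dict.mk wl).get? u with
        | none => rw [h] at this; simp at this
        | some w => exact ⟨w, rfl⟩
      have hstep : loopB wl c ap g (f + 1) (x :: xs) total =
          loopB wl c ap g f (rest ++ pvAdj g u) (if w = ap then total + c else total) := by
        simp only [loopB, ← hu, ← hrest, hw, pvAdj]
      rw [hstep]
      have hmemR : ∀ v ∈ rest ++ pvAdj g u, v ∈ R := by
        intro v hv
        rcases List.mem_append.mp hv with h1 | h2
        · exact hstR v (by rw [← hsplit]; exact List.mem_append.mpr (Or.inl h1))
        · exact hcl u huR v h2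
      have hwsum : ((x :: xs).map (pvWgt g R)).sum
          = (rest.map (pvWgt g R)).sum + pvWgt g R u := by
        rw [← hsplit]; simp
      have hwu := pvWgt_ge g R u hC2 huR
      have hm' : ((rest ++ pvAdj g u).map (pvWgt g R)).sum + 1 ≤ f := by
        rw [List.map_append, List.sum_append]
        omega
      rw [ih (rest ++ pvAdj g u) (if w = ap then total + c else total) hmemR hm']
      obtain ⟨w', hw', hrec⟩ := pvVal_rec wl c ap g R hwl hcl hC2 u huR
      rw [hw] at hw'
      injection hw' with hww
      subst hww
      congr 1
      rw [← hsplit]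
      simp only [List.map_append, List.sum_append, List.map_cons, List.map_nil, List.sum_cons,
        List.sum_nil]
      rw [hrec]
      split_ifs <;> ring

-- ===== VERDICT (by name: the statement is the Claim_ definition above) =====
theorem dfs_spec : Claim_equal_dfs := by
  intro src wl cost apple val g _ hPre
  obtain ⟨hwl, hcl, hC2⟩ := hPre
  unfold Spec_dfs
  have hsrc : src ∈ pvReach src g := pvSrc_mem_reach src g
  have hle := pvRank_le g (pvReach src g) src hC2
  -- A's side: dfs = pvVal src
  have hA : dfs src wl cost apple val g = pvVal wl cost apple g src := rfl
  -- B's side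
  have hwgt : pvWgt g (pvReach src g) src ≤ (pvMaxAdj g + 1) ^ (g.length + 1) :=
    Nat.pow_le_pow_right (by omega) hle
  have hB := pvLoopB_eval wl cost apple g (pvReach src g) hwl hcl hC2
    ((pvMaxAdj g + 1) ^ (g.length + 1) + 1) [src] 0
    (by intro u hu; simp at hu; subst hu; exact hsrc)
    (by simp; omega)
  unfold dfs_alt
  rw [hB]
  simp [hA, pvVal]
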